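-- pv_equiv track=rewrite | github.com/mbj4668/pyang | pyang/xpath.py | check_and_return_parameters
-- ===== SOURCE A (Python) =====
-- def check_and_return_parameters(expected_count, tokens, func_name):
--     parameters = []
--     brackets = 1
--     parameter = []
--     x = 0
--     if tokens[x][1] == '(':
--         x += 1
--
--     while brackets:
--         if tokens[x][1] == ')':
--             parameter.append(tokens[x][1])
--             brackets -= 1
--         elif tokens[x][1] == '(':
--             parameter.append(tokens[x][1])
--             brackets += 1
--         elif tokens[x][1] == ',':
--             parameters.append(''.join(parameter))
--             parameter = []
--         else:
--             parameter.append(tokens[x][1])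
--         x += 1
--
--     if len(parameter) > 0:
--         parameters.append(''.join(parameter[:-1]))
--     if expected_count > 0:
--         if len(parameters) != expected_count:
--             raise SyntaxError('Expected {} arguments in function "{}", ' +
--                               'but received {}'.format(expected_count,
--                                                        func_name,
--                                                        len(parameters)))
--     return parameters
-- ===== SOURCE B (Python) =====
-- def check_and_return_parameters(expected_count, tokens, func_name):
--     # One pass that only tracks depth and collects raw token values until the
--     # call's closing ')'; parameter splitting is a separate post-pass.
--     collected = []
--     depth = 1
--     i = 1 if tokens[0][1] == '(' else 0
--     while depth:
--         v = tokens[i][1]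
--         if v == '(':
--             depth += 1
--         elif v == ')':
--             depth -= 1
--         collected.append(v)
--         i += 1
--     # Split the collected values on ',' tokens; the last chunk ends with the
--     # terminating ')', which is dropped.
--     chunks = [[]]
--     for v in collected:
--         if v == ',':
--             chunks.append([])
--         else:
--             chunks[-1].append(v)
--     chunks[-1].pop()
--     parameters = [''.join(c) for c in chunks]
--     if expected_count > 0 and len(parameters) != expected_count:
--         raise SyntaxError('Expected {} arguments in function "{}", '
--                           'but received {}'.format(expected_count, func_name,
--                                                    len(parameters)))
--     return parameters
-- ===== Notes on version B (the rewrite author's own statement) =====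
-- stated objective: alternative
-- what changed: A interleaves parameter splitting with the bracket-tracking scan (flushing on each ',' and maintaining parameters/parameter state); B's loop only tracks depth and collects every raw token value up to the closing ')', then a separate post-pass splits the collected list on ',' tokens, pops the terminating ')' from the last chunk and joins each chunk.
import Mathlib
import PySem

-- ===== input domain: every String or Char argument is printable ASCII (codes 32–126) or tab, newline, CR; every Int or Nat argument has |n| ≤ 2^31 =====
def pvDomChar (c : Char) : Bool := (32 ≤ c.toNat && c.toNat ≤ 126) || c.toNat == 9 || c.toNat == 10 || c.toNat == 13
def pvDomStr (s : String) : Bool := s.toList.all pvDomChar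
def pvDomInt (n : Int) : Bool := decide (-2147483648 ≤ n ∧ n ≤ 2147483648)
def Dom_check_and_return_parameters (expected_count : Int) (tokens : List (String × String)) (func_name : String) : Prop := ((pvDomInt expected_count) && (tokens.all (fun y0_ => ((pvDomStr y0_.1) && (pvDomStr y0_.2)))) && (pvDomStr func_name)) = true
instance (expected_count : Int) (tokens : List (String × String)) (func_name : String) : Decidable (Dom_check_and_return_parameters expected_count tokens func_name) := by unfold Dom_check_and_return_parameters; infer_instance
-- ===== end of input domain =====

-- B re-decomposes A: one depth-tracking pass that only collects raw token values, then a
-- separate post-pass splits them on ',' tokens; same return value (objective: alternative).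

-- ===== PORT A =====
-- A's while loop: state (brackets, parameters, parameter) walking the remaining tokens
-- (when the tokens run out with brackets ≠ 0 Python raises IndexError — excluded by Pre_)
def pvGoA : Int → List String → List String → List (String × String) → List String × List String
  | brackets, params, param, ts =>
    if brackets = 0 then (params, param)
    else
      match ts with
      | [] => (params, param)
      | t :: rest =>
        if t.2 = ")" then pvGoA (brackets - 1) params (param ++ [t.2]) rest
        else if t.2 = "(" then pvGoA (brackets + 1) params (param ++ [t.2]) rest
        else if t.2 = "," then pvGoA brackets (params ++ [PySem.Str.join "" param]) [] rest
        else pvGoA brackets params (param ++ [t.2]) rest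

-- A's two post-loop lines: flush the (joined) pending parameter without its last element
def pvFinishA (p : List String × List String) : List String :=
  if p.2.length > 0 then p.1 ++ [PySem.Str.join "" p.2.dropLast] else p.1

def check_and_return_parameters (expected_count : Int) (tokens : List (String × String)) (func_name : String) : List String :=
  match tokens with
  | [] => []   -- tokens[0] raises IndexError in Python; excluded by Pre_
  | t0 :: rest =>
    -- x = 1 iff tokens[0][1] == '('; the expected_count mismatch only raises
    -- SyntaxError in Python and is excluded by Pre_
    pvFinishA (pvGoA 1 [] [] (if t0.2 = "(" then rest else t0 :: rest))

-- ===== PORT B =====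
-- B's while loop: track depth, collect every token value until the closing ')'
def pvCollect : Int → List String → List (String × String) → List String
  | depth, acc, ts =>
    if depth = 0 then acc
    else
      match ts with
      | [] => acc   -- tokens[i] raises IndexError in Python; excluded by Pre_
      | t :: rest =>
        pvCollect (if t.2 = "(" then depth + 1 else if t.2 = ")" then depth - 1 else depth)
          (acc ++ [t.2]) rest

-- chunks[-1] (the chunk list is nonempty throughout B)
def pvLast : List (List String) → List String
  | [] => []
  | [c] => c
  | _ :: c :: cs => pvLast (c :: cs)

-- one step of B's chunk-building for loop (open a new chunk / append to the last chunk)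
def pvStep (cs : List (List String)) (v : String) : List (List String) :=
  if v = "," then cs ++ [[]] else cs.dropLast ++ [pvLast cs ++ [v]]

-- B's finish: chunks[-1].pop(), then join each chunk
def pvFinishB (chunks : List (List String)) : List String :=
  (chunks.dropLast ++ [(pvLast chunks).dropLast]).map (PySem.Str.join "")

def check_and_return_parameters_alt (expected_count : Int) (tokens : List (String × String)) (func_name : String) : List String :=
  match tokens with
  | [] => []   -- tokens[0] raises IndexError in Python; excluded by Pre_
  | t0 :: rest =>
    pvFinishB (List.foldl pvStep [[]]
      (pvCollect 1 [] (if t0.2 = "(" then rest else t0 :: rest)))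

-- ===== PRECONDITION & SPEC =====
-- depth update per token value (')' closes, '(' opens)
def pvDepthStep (d : Int) (v : String) : Int :=
  if v = "(" then d + 1 else if v = ")" then d - 1 else d

-- the call's closing ')' exists: the bracket depth, started at d, reaches 0 within vs
def pvCloses : Int → List String → Bool
  | d, vs =>
    if d = 0 then true
    else match vs with
      | [] => false
      | v :: r => pvCloses (pvDepthStep d v) r

-- number of parameters of the call: 1 + number of ',' tokens before the closing ')'
def pvNParams : Int → List String → Int
  | d, vs =>
    if d = 0 then 1
    else match vs with
      | [] => 1
      | v :: r => (if v = "," then 1 else 0) + pvNParams (pvDepthStep d v) r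

-- Pre_ excludes exactly the inputs where Python A raises: empty tokens / no closing ')'
-- (IndexError), and a parameter-count mismatch with expected_count > 0 (SyntaxError).
def Pre_check_and_return_parameters (expected_count : Int) (tokens : List (String × String)) (func_name : String) : Prop :=
  (match tokens with
   | [] => false
   | t0 :: rest =>
     pvCloses 1 ((if t0.2 = "(" then rest else t0 :: rest).map Prod.snd)
     && (decide (expected_count ≤ 0)
         || pvNParams 1 ((if t0.2 = "(" then rest else t0 :: rest).map Prod.snd) == expected_count)) = true
instance (expected_count : Int) (tokens : List (String × String)) (func_name : String) : Decidable (Pre_check_and_return_parameters expected_count tokens func_name) := by unfold Pre_check_and_return_parameters; infer_instance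

def pvWitness_check_and_return_parameters : Int × (List (String × String)) × String :=
  (2, [("p", "("), ("n", "a"), ("s", ","), ("n", "b"), ("p", ")")], "f")

def Spec_check_and_return_parameters (expected_count : Int) (tokens : List (String × String)) (func_name : String) (out : List String) : Prop := out = check_and_return_parameters_alt expected_count tokens func_name
instance (expected_count : Int) (tokens : List (String × String)) (func_name : String) (out : List String) : Decidable (Spec_check_and_return_parameters expected_count tokens func_name out) := by unfold Spec_check_and_return_parameters; infer_instance

-- ===== CLAIM (what is proved, stated in full; the proofs are below) =====
def Claim_equal_check_and_return_parameters : Prop := ∀ (expected_count : Int) (tokens : List (String × String)) (func_name : String), Dom_check_and_return_parameters expected_count tokens func_name → Pre_check_and_return_parameters expected_count tokens func_name → Spec_check_and_return_parameters expected_count tokens func_name (check_and_return_parameters expected_count tokens func_name)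

-- ===== LEMMAS AND PROOFS =====

-- right-recursive characterisation of B's chunk splitting
def pvSplit : List String → List (List String)
  | [] => [[]]
  | v :: rest =>
    if v = "," then [] :: pvSplit rest
    else match pvSplit rest with
      | [] => [[v]]
      | c :: cs => (v :: c) :: cs

-- prepend c to the head chunk
def pvCons (c : List String) : List (List String) → List (List String)
  | [] => [c]
  | c0 :: cs => (c ++ c0) :: cs

lemma pvSplit_ne_nil (l : List String) : pvSplit l ≠ [] := by
  cases l with
  | nil => simp [pvSplit]
  | cons v r =>
    simp only [pvSplit]
    split
    · simp
    · split <;> simp_all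

lemma pvSplit_noComma (l : List String) (h : "," ∉ l) : pvSplit l = [l] := by
  induction l with
  | nil => rfl
  | cons v r ih =>
    simp only [List.mem_cons, not_or] at h
    simp only [pvSplit, if_neg (Ne.symm h.1)]
    rw [ih h.2]

lemma pvSplit_comma (p l : List String) (h : "," ∉ p) :
    pvSplit (p ++ "," :: l) = p :: pvSplit l := by
  induction p with
  | nil => simp [pvSplit]
  | cons v r ih =>
    simp only [List.mem_cons, not_or] at h
    simp only [List.cons_append, pvSplit, if_neg (Ne.symm h.1)]
    rw [ih h.2]

lemma pvLast_concat (cs : List (List String)) (c : List String) : pvLast (cs ++ [c]) = c := by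
  induction cs with
  | nil => rfl
  | cons c0 cs ih =>
    cases cs with
    | nil => rfl
    | cons c1 cs' => simpa [pvLast] using ih

lemma pvLast_cons (c : List String) (cs : List (List String)) (h : cs ≠ []) :
    pvLast (c :: cs) = pvLast cs := by
  cases cs with
  | nil => exact absurd rfl h
  | cons c1 cs' => rfl

lemma pvFinishB_cons (c : List String) (cs : List (List String)) (h : cs ≠ []) :
    pvFinishB (c :: cs) = PySem.Str.join "" c :: pvFinishB cs := by
  unfold pvFinishB
  rw [List.dropLast_cons_of_ne_nil h, pvLast_cons c cs h]
  simp

lemma foldl_pvStep (l : List String) (cs : List (List String)) (c : List String) :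
    List.foldl pvStep (cs ++ [c]) l = cs ++ pvCons c (pvSplit l) := by
  induction l generalizing cs c with
  | nil => simp [pvSplit, pvCons]
  | cons v r ih =>
    by_cases hv : v = ","
    · subst hv
      simp only [List.foldl_cons, pvStep, reduceIte]
      rw [ih (cs ++ [c]) []]
      simp only [pvSplit, reduceIte]
      cases hs : pvSplit r with
      | nil => exact absurd hs (pvSplit_ne_nil r)
      | cons c0 cs0 => simp [pvCons]
    · simp only [List.foldl_cons, pvStep, if_neg hv]
      rw [List.dropLast_concat, pvLast_concat, ih cs (c ++ [v])]
      simp only [pvSplit, if_neg hv]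
      cases hs : pvSplit r with
      | nil => exact absurd hs (pvSplit_ne_nil r)
      | cons c0 cs0 => simp [pvCons]

lemma foldl_pvStep_init (l : List String) :
    List.foldl pvStep [[]] l = pvSplit l := by
  have h := foldl_pvStep l [] []
  simp only [List.nil_append] at h
  rw [h]
  cases hs : pvSplit l with
  | nil => exact absurd hs (pvSplit_ne_nil l)
  | cons c0 cs0 => simp [pvCons]

lemma pvCollect_acc (ts : List (String × String)) (d : Int) (acc : List String) :
    pvCollect d acc ts = acc ++ pvCollect d [] ts := by
  induction ts generalizing d acc with
  | nil => unfold pvCollect; split <;> simp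
  | cons t r ih =>
    rw [pvCollect]
    conv_rhs => rw [pvCollect]
    split
    · simp
    · rw [ih _ (acc ++ [t.2]), ih _ ([] ++ [t.2])]
      simp

-- the central invariant: A's loop-plus-finish equals B's split of the collected values
lemma pvCloses_cons (d : Int) (v : String) (r : List String) (h : ¬ d = 0) :
    pvCloses d (v :: r) = pvCloses (pvDepthStep d v) r := by
  rw [pvCloses.eq_def]; simp [h]

lemma pvCloses_nil (d : Int) (h : ¬ d = 0) : pvCloses d [] = false := by
  rw [pvCloses.eq_def]; simp [h]

lemma pvGoA_zero (params param : List String) (ts : List (String × String)) :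
    pvGoA 0 params param ts = (params, param) := by
  rw [pvGoA.eq_def]; simp

lemma pvCollect_zero (acc : List String) (ts : List (String × String)) :
    pvCollect 0 acc ts = acc := by
  rw [pvCollect.eq_def]; simp

lemma pvMain (ts : List (String × String)) (b : Int) (params param : List String)
    (hb : 1 ≤ b) (hc : pvCloses b (ts.map Prod.snd) = true) (hp : "," ∉ param) :
    pvFinishA (pvGoA b params param ts)
      = params ++ pvFinishB (pvSplit (param ++ pvCollect b [] ts)) := by
  induction ts generalizing b params param with
  | nil =>
    rw [List.map_nil, pvCloses_nil b (by omega)] at hc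
    exact absurd hc (by simp)
  | cons t r ih =>
    obtain ⟨tk, v⟩ := t
    simp only [List.map_cons] at hc
    rw [pvCloses_cons _ _ _ (by omega)] at hc
    rw [pvGoA, if_neg (by omega)]
    conv_rhs => rw [pvCollect, if_neg (by omega)]
    rw [pvCollect_acc r _ ([] ++ [(tk, v).2])]
    simp only [List.nil_append]
    by_cases hv1 : v = ")"
    · subst hv1
      rw [show pvDepthStep b ")" = b - 1 by simp [pvDepthStep]] at hc
      simp only [String.reduceEq, reduceIte]
      by_cases hb1 : b = 1
      · subst hb1
        rw [show (1 : Int) - 1 = 0 from rfl, pvGoA_zero, pvCollect_zero]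
        have hnc : "," ∉ param ++ [")"] := by
          simp only [List.mem_append, List.mem_singleton]
          rintro (h | h)
          · exact hp h
          · exact absurd h (by decide)
        simp only [List.append_nil]
        rw [pvSplit_noComma (param ++ [")"]) hnc]
        unfold pvFinishA pvFinishB
        simp [pvLast]
      · have hnc : "," ∉ param ++ [")"] := by
          simp only [List.mem_append, List.mem_singleton]
          rintro (h | h)
          · exact hp h
          · exact absurd h (by decide)
        rw [ih (b - 1) params (param ++ [")"]) (by omega) hc hnc]
        simp
    · by_cases hv2 : v = "("
      · subst hv2
        rw [show pvDepthStep b "(" = b + 1 by simp [pvDepthStep]] at hc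
        simp only [String.reduceEq, reduceIte]
        have hnc : "," ∉ param ++ ["("] := by
          simp only [List.mem_append, List.mem_singleton]
          rintro (h | h)
          · exact hp h
          · exact absurd h (by decide)
        rw [ih (b + 1) params (param ++ ["("]) (by omega) hc hnc]
        simp
      · by_cases hv3 : v = ","
        · subst hv3
          rw [show pvDepthStep b "," = b by simp [pvDepthStep]] at hc
          simp only [String.reduceEq, reduceIte]
          rw [ih b (params ++ [PySem.Str.join "" param]) [] hb hc (by simp)]
          rw [show param ++ ([","] ++ pvCollect b [] r) = param ++ "," :: pvCollect b [] r by simp]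
          rw [pvSplit_comma param (pvCollect b [] r) hp]
          rw [pvFinishB_cons _ _ (pvSplit_ne_nil _)]
          simp
        · rw [show pvDepthStep b v = b by simp [pvDepthStep, hv1, hv2]] at hc
          simp only [if_neg hv1, if_neg hv2, if_neg hv3]
          have hnc : "," ∉ param ++ [v] := by
            simp only [List.mem_append, List.mem_singleton]
            rintro (h | h)
            · exact hp h
            · exact hv3 h.symm
          rw [ih b params (param ++ [v]) hb hc hnc]
          simp

-- ===== VERDICT (by name: the statement is the Claim_ definition above) =====
theorem check_and_return_parameters_spec : Claim_equal_check_and_return_parameters := by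
  intro ec tokens fn hDom hPre
  unfold Spec_check_and_return_parameters
  unfold Pre_check_and_return_parameters at hPre
  cases tokens with
  | nil => simp at hPre
  | cons t0 rest =>
    simp only [Bool.and_eq_true] at hPre
    simp only [check_and_return_parameters, check_and_return_parameters_alt]
    rw [foldl_pvStep_init]
    have h := pvMain (if t0.2 = "(" then rest else t0 :: rest) 1 [] []
      (le_refl 1) hPre.1 (by simp)
    simpa using h
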